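-- pv_equiv track=rewrite | github.com/louie-jones-strong/CalculatorGame-Solver | Solver/Operations.py | DoActionOnValue
-- ===== SOURCE A (Python) =====
-- def DoActionOnValue(inputValue):
-- 	isNegtive = inputValue < 0
-- 	if isNegtive:
-- 		inputValue *= -1
--
-- 	valueList = map(lambda x: int(x), str(inputValue))
--
-- 	newString = ""
-- 	for item in valueList:
-- 		if item == 0:
-- 			newString += "0"
-- 		else:
-- 			newString += str(10-item)
--
-- 	newValue = int(newString)
--
-- 	if isNegtive:
-- 		newValue *= -1
-- 	return newValue
-- ===== SOURCE B (Python) =====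
-- def DoActionOnValue(inputValue):
--     isNegative = inputValue < 0
--     n = -inputValue if isNegative else inputValue
--     result = 0
--     place = 1
--     while n > 0:
--         d = n % 10
--         result += ((10 - d) % 10) * place
--         place *= 10
--         n //= 10
--     return -result if isNegative else result
-- ===== Notes on version B (the rewrite author's own statement) =====
-- stated objective: alternative
-- what changed: Replaces the string round-trip of A — str of n, per-character int, building a new digit string, reparsing with int — by a pure arithmetic least-significant-digit loop: each digit d taken with modulo is mapped to ten minus d, zero staying zero, and accumulated with a place-value multiplier, so no strings are built or parsed.
import Mathlib
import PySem

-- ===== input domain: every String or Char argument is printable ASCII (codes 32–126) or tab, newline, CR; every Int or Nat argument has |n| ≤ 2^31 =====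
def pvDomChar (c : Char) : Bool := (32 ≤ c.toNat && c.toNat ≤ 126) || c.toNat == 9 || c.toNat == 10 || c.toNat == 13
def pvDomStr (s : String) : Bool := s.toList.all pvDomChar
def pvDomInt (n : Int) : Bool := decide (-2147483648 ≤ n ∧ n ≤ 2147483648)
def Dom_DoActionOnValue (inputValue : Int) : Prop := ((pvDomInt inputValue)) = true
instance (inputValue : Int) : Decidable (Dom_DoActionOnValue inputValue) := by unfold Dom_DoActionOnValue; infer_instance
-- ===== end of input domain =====

-- B replaces A's string round-trip (str, per-char int, rebuild string, int) by a pure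
-- arithmetic least-significant-digit loop with a place-value accumulator (objective: alternative).

-- ===== PORT A =====
-- Literal transliteration of A: drop the sign, map each character of str(n) to its int
-- value, rebuild a string digit by digit ("0" for 0, str(10-d) otherwise), reparse it.
-- The two `.getD 0` never fire: int() is applied to decimal-digit characters only
-- (str of a nonnegative int), where Python cannot raise.
def DoActionOnValue (inputValue : Int) : Int :=
  let isNegtive : Bool := decide (inputValue < 0)
  let inputValue : Int := if isNegtive then inputValue * (-1) else inputValue
  let valueList : List Int :=
    (PySem.Int.toChars inputValue).map (fun c => (PySem.Int.ofChars? [c]).getD 0)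
  let newString : List Char :=
    valueList.foldl
      (fun s item => s ++ (if item == 0 then ['0'] else PySem.Int.toChars (10 - item))) []
  let newValue : Int := (PySem.Int.ofChars? newString).getD 0
  if isNegtive then newValue * (-1) else newValue

-- ===== PORT B =====
-- the while-loop of B: while n > 0: result += ((10 - n % 10) % 10) * place; place *= 10; n //= 10
def altGo (n place result : Int) : Int :=
  if _h : 0 < n then
    altGo (PySem.Int.floordiv n 10) (place * 10)
      (result + PySem.Int.mod (10 - PySem.Int.mod n 10) 10 * place)
  else result
termination_by n.toNat
decreasing_by
  rw [PySem.Int.floordiv_eq_ediv_of_pos (by norm_num : (0:Int) < 10)]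
  omega

def DoActionOnValue_alt (inputValue : Int) : Int :=
  let isNegative : Bool := decide (inputValue < 0)
  let n : Int := if isNegative then -inputValue else inputValue
  let result : Int := altGo n 1 0
  if isNegative then -result else result

-- ===== PRECONDITION & SPEC =====
def Spec_DoActionOnValue (inputValue : Int) (out : Int) : Prop := out = DoActionOnValue_alt inputValue
instance (inputValue : Int) (out : Int) : Decidable (Spec_DoActionOnValue inputValue out) := by unfold Spec_DoActionOnValue; infer_instance

-- ===== CLAIM (what is proved, stated in full; the proofs are below) =====
def Claim_equal_DoActionOnValue : Prop := ∀ (inputValue : Int), Dom_DoActionOnValue inputValue → Spec_DoActionOnValue inputValue (DoActionOnValue inputValue)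

-- ===== LEMMAS AND PROOFS =====

-- the digit transformation both programs perform, on a single decimal digit
def tr (d : Nat) : Nat := if d = 0 then 0 else 10 - d

-- A's pipeline on the (made nonnegative) input, for proof decomposition
def Apipe (v : Int) : Int :=
  (PySem.Int.ofChars?
    (((PySem.Int.toChars v).map (fun c => (PySem.Int.ofChars? [c]).getD 0)).foldl
      (fun s item => s ++ (if item == 0 then ['0'] else PySem.Int.toChars (10 - item))) [])).getD 0

theorem A_eq (v : Int) :
    DoActionOnValue v = if decide (v < 0) then Apipe (v * (-1)) * (-1) else Apipe v := by
  by_cases h : v < 0 <;> simp only [DoActionOnValue, Apipe, h, decide_true, decide_false,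
    if_true, if_false, Bool.false_eq_true]

theorem B_eq (v : Int) :
    DoActionOnValue_alt v = if decide (v < 0) then -(altGo (-v) 1 0) else altGo v 1 0 := by
  by_cases h : v < 0 <;> simp only [DoActionOnValue_alt, h, decide_true, decide_false,
    if_true, if_false, Bool.false_eq_true]

-- ---- capturing the (private) integer-parsing helpers of PySem.Int.ofChars? ----
-- obWrapper / obDV / obStep restate the shape of ofChars? and its hidden helpers;
-- the `capture` theorem obtains those helpers abstractly, with all equations by rfl.
def obWrapper (DV : List Char → Option Nat) (s : List Char) : Option Int :=
  PySem.Int.ofChars?.match_1 (motive := fun _ => Option Int)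
    (List.dropWhile PySem.Int.isIntSpace (List.dropWhile PySem.Int.isIntSpace s).reverse).reverse
    (fun ds => Option.map (fun n => -n) (do let a ← DV ds; pure (a : Int)))
    (fun ds => Option.map (fun n => n) (do let a ← DV ds; pure (a : Int)))
    (fun ds => Option.map (fun n => n) (do let a ← DV ds; pure (a : Int)))

def obDV (GO : List Char → Bool → Nat → Option Nat) (x : List Char) : Option Nat :=
  match x with
  | [] => none
  | cs => GO cs false 0

def obStep (GO : List Char → Bool → Nat → Option Nat) (c : Char) (rest : List Char)
    (b : Bool) (a : Nat) : Option Nat :=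
  if c.isDigit = true then GO rest true (a * 10 + (c.toNat - '0'.toNat))
  else
    if c = '_' ∧ b = true then
      match rest with
      | d :: _ => if d.isDigit = true then GO rest false a else none
      | [] => none
    else none

theorem capture : ∃ (DV : List Char → Option Nat) (GO : List Char → Bool → Nat → Option Nat),
    (∀ s, PySem.Int.ofChars? s = obWrapper DV s) ∧
    (∀ cs, DV cs = obDV GO cs) ∧
    (∀ b a, GO [] b a = if b = true then some a else none) ∧
    (∀ c rest b a, GO (c :: rest) b a = obStep GO c rest b a) :=
  ⟨_, _, fun _ => rfl, fun _ => rfl, fun _ _ => rfl, fun _ _ _ _ => rfl⟩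

-- ---- small digit-character facts ----
theorem digitChar_facts (d : Nat) (hd : d < 10) :
    (Nat.digitChar d).isDigit = true ∧ (Nat.digitChar d).toNat - '0'.toNat = d ∧
    PySem.Int.isIntSpace (Nat.digitChar d) = false ∧
    Nat.digitChar d ≠ '-' ∧ Nat.digitChar d ≠ '+' := by
  interval_cases d <;> decide

-- int("c") for a single digit character
theorem parse_single_digit (d : Nat) (hd : d < 10) :
    PySem.Int.ofChars? [Nat.digitChar d] = some (d : Int) := by
  interval_cases d <;> decide

-- the per-item string A appends, for a digit item
theorem append_item_eq (d : Nat) (hd : d < 10) :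
    (if (d : Int) == 0 then ['0'] else PySem.Int.toChars (10 - (d : Int))) =
      [Nat.digitChar (tr d)] := by
  interval_cases d <;> decide

-- ---- dropWhile does nothing on a list of non-space characters ----
theorem dropWhile_eq_self_of_all (l : List Char)
    (h : ∀ c ∈ l, PySem.Int.isIntSpace c = false) :
    List.dropWhile PySem.Int.isIntSpace l = l := by
  cases l with
  | nil => rfl
  | cons c cs =>
    rw [List.dropWhile_eq_self_iff]
    intro _
    simp [h c (by simp)]

-- ---- the third branch of ofChars?.match_1 fires when the head is neither '-' nor '+' ----
theorem match1_other {motive : List Char → Sort _} (c : Char) (cs : List Char)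
    (h1 : (ds : List Char) → motive ('-' :: ds)) (h2 : (ds : List Char) → motive ('+' :: ds))
    (h3 : (ds : List Char) → motive ds) (hm : c ≠ '-') (hp : c ≠ '+') :
    PySem.Int.ofChars?.match_1 motive (c :: cs) h1 h2 h3 = h3 (c :: cs) := by
  unfold PySem.Int.ofChars?.match_1 PySem.Int.ofChars?._sparseCasesOn_1
  simp [hm, hp]

-- ---- the digit-parsing loop on a list of digit characters ----
theorem go_digits (GO : List Char → Bool → Nat → Option Nat)
    (hGO0 : ∀ b a, GO [] b a = if b = true then some a else none)
    (hGOc : ∀ c rest b a, GO (c :: rest) b a = obStep GO c rest b a)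
    (ds : List Nat) (b : Bool) (a : Nat) (hds : ∀ d ∈ ds, d < 10)
    (hne : b = true ∨ ds ≠ []) :
    GO (ds.map Nat.digitChar) b a = some (ds.foldl (fun x d => x * 10 + d) a) := by
  induction ds generalizing b a with
  | nil =>
    rcases hne with hb | hne
    · simp [hGO0, hb]
    · exact absurd rfl hne
  | cons d rest ih =>
    have hd : d < 10 := hds d (by simp)
    obtain ⟨hdig, htn, -, -, -⟩ := digitChar_facts d hd
    rw [List.map_cons, hGOc, obStep.eq_def, if_pos hdig, htn]
    exact ih true (a * 10 + d) (fun x hx => hds x (by simp [hx])) (Or.inl rfl)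

-- ---- int(s) on a nonempty all-digit string ----
theorem parse_digit_string (ds : List Nat) (hds : ∀ d ∈ ds, d < 10) (hne : ds ≠ []) :
    PySem.Int.ofChars? (ds.map Nat.digitChar) =
      some ((ds.foldl (fun x d => x * 10 + d) 0 : Nat) : Int) := by
  obtain ⟨DV, GO, hW, hDV, hGO0, hGOc⟩ := capture
  have hall : ∀ c ∈ ds.map Nat.digitChar, PySem.Int.isIntSpace c = false := by
    intro c hc
    obtain ⟨d, hd, rfl⟩ := List.mem_map.mp hc
    exact (digitChar_facts d (hds d hd)).2.2.1
  rw [hW, obWrapper]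
  rw [dropWhile_eq_self_of_all _ hall,
      dropWhile_eq_self_of_all _ (by intro c hc; exact hall c (List.mem_reverse.mp hc)),
      List.reverse_reverse]
  cases ds with
  | nil => exact absurd rfl hne
  | cons d rest =>
    have hd : d < 10 := hds d (by simp)
    obtain ⟨-, -, -, hm, hp⟩ := digitChar_facts d hd
    rw [List.map_cons, match1_other _ _ _ _ _ hm hp, hDV]
    rw [show obDV GO (Nat.digitChar d :: rest.map Nat.digitChar)
          = GO ((d :: rest).map Nat.digitChar) false 0 from rfl]
    rw [go_digits GO hGO0 hGOc (d :: rest) false 0 hds (Or.inr (by simp))]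
    rfl

-- ---- MSB-first fold of digits = ofDigits of the LSB list ----
theorem foldl_eq_ofDigits (ds : List Nat) (a : Nat) :
    ds.foldl (fun x d => x * 10 + d) a = a * 10 ^ ds.length + Nat.ofDigits 10 ds.reverse := by
  induction ds generalizing a with
  | nil => simp
  | cons d rest ih =>
    rw [List.foldl_cons, ih, List.reverse_cons, Nat.ofDigits_append]
    simp [pow_succ]
    ring

-- ---- Nat.toDigits produces the decimal digit characters, MSB first ----
theorem toDigitsCore_eq (f : Nat) : ∀ (n : Nat) (ds : List Char), 0 < n → n < 10 ^ f →
    Nat.toDigitsCore 10 f n ds = ((Nat.digits 10 n).map Nat.digitChar).reverse ++ ds := by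
  induction f with
  | zero => intro n ds h1 h2; simp at h2; omega
  | succ f ih =>
    intro n ds h1 h2
    rw [Nat.toDigitsCore.eq_def]
    simp only
    by_cases h10 : n / 10 = 0
    · rw [if_pos h10]
      have hn : n < 10 := by omega
      rw [Nat.digits_def' (by norm_num) h1, h10]
      simp
    · rw [if_neg h10]
      rw [ih (n / 10) _ (Nat.pos_of_ne_zero h10) (by
        have := Nat.div_lt_iff_lt_mul (show 0 < 10 by norm_num) (x := n) (y := 10 ^ f)
        rw [pow_succ] at h2
        omega)]
      rw [Nat.digits_def' (by norm_num) h1]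
      simp

theorem toChars_of_pos (m : Nat) (hm : 0 < m) :
    PySem.Int.toChars (m : Int) = ((Nat.digits 10 m).map Nat.digitChar).reverse := by
  rw [PySem.Int.toChars]
  rw [if_neg (by omega)]
  have : ((m : Int)).toNat = m := by omega
  rw [this, Nat.toDigits]
  rw [toDigitsCore_eq (m + 1) m [] hm (lt_of_lt_of_le (Nat.lt_pow_self (by norm_num))
    (Nat.pow_le_pow_right (by norm_num) (by omega)))]
  simp

-- the digit-by-digit string A builds, elementwise
theorem flat_tr (l : List Nat) (h : ∀ d ∈ l, d < 10) :
    (l.map (fun d : Nat => (d : Int))).flatMap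
        (fun item => if item == 0 then ['0'] else PySem.Int.toChars (10 - item))
      = (l.map tr).map Nat.digitChar := by
  induction l with
  | nil => rfl
  | cons d rest ihr =>
    rw [List.map_cons, List.flatMap_cons, List.map_cons, List.map_cons,
      ihr (fun x hx => h x (by simp [hx])), append_item_eq d (h d (by simp))]
    rfl

-- ---- A's pipeline on a positive input computes ofDigits of the transformed digits ----
theorem Apipe_pos (m : Nat) (hm : 0 < m) :
    Apipe (m : Int) = ((Nat.ofDigits 10 ((Nat.digits 10 m).map tr) : Nat) : Int) := by
  have hdig : ∀ d ∈ Nat.digits 10 m, d < 10 :=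
    fun d hd => Nat.digits_lt_base (by norm_num) hd
  rw [Apipe, toChars_of_pos m hm]
  rw [← List.map_reverse, List.map_map]
  have h1 : ((Nat.digits 10 m).reverse.map ((fun c => (PySem.Int.ofChars? [c]).getD 0) ∘ Nat.digitChar))
      = (Nat.digits 10 m).reverse.map (fun d : Nat => (d : Int)) := by
    apply List.map_congr_left
    intro d hd
    have : d < 10 := hdig d (List.mem_reverse.mp hd)
    simp [Function.comp, parse_single_digit d this]
  rw [h1]
  rw [PySem.List.foldl_append_eq_flatMap, List.nil_append]
  rw [flat_tr _ (fun d hd => hdig d (List.mem_reverse.mp hd))]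
  rw [parse_digit_string _ (by
      intro d hd
      obtain ⟨x, hx, rfl⟩ := List.mem_map.mp hd
      have : x < 10 := hdig x (List.mem_reverse.mp hx)
      unfold tr; split <;> omega)
    (by
      simp only [ne_eq, List.map_eq_nil_iff, List.reverse_eq_nil_iff]
      exact Nat.digits_ne_nil_iff_ne_zero.mpr (by omega))]
  rw [Option.getD_some, foldl_eq_ofDigits]
  simp [← List.map_reverse]

-- ---- B's loop computes the same value ----
theorem altGo_eq (k : Nat) : ∀ (place result : Int),
    altGo (k : Int) place result =
      result + place * ((Nat.ofDigits 10 ((Nat.digits 10 k).map tr) : Nat) : Int) := by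
  induction k using Nat.strong_induction_on with
  | _ k ih =>
    intro place result
    rw [altGo]
    by_cases hk : 0 < k
    · rw [dif_pos (by exact_mod_cast hk)]
      have hfd : PySem.Int.floordiv (k : Int) 10 = ((k / 10 : Nat) : Int) := by
        exact_mod_cast PySem.Int.floordiv_natCast k 10
      have hmd : PySem.Int.mod (k : Int) 10 = ((k % 10 : Nat) : Int) := by
        exact_mod_cast PySem.Int.mod_natCast k 10
      have htr : PySem.Int.mod (10 - ((k % 10 : Nat) : Int)) 10 = ((tr (k % 10) : Nat) : Int) := by
        have hlt : k % 10 < 10 := Nat.mod_lt _ (by norm_num)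
        generalize hg : k % 10 = r at hlt ⊢
        interval_cases r <;> decide
      rw [hfd, hmd, htr, ih (k / 10) (Nat.div_lt_self hk (by norm_num))]
      rw [Nat.digits_def' (by norm_num : (1:Nat) < 10) hk, List.map_cons, Nat.ofDigits_cons]
      push_cast
      ring
    · have hk0 : k = 0 := by omega
      rw [dif_neg (by exact_mod_cast hk)]
      subst hk0
      simp

-- ===== VERDICT (by name: the statement is the Claim_ definition above) =====
theorem DoActionOnValue_spec : Claim_equal_DoActionOnValue := by
  intro v _
  unfold Spec_DoActionOnValue
  rw [A_eq, B_eq]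
  by_cases hv : v < 0
  · rw [if_pos (by simp [hv]), if_pos (by simp [hv])]
    obtain ⟨k, hkv⟩ : ∃ k : Nat, -v = (k : Int) := ⟨(-v).toNat, by omega⟩
    have hpos : 0 < k := by omega
    rw [show v * (-1) = (k : Int) from by omega, hkv, Apipe_pos _ hpos, altGo_eq]
    simp
  · rw [if_neg (by simp [hv]), if_neg (by simp [hv])]
    by_cases h0 : v = 0
    · subst h0
      have hz : altGo 0 1 0 = 0 := by rw [altGo]; norm_num
      rw [hz]; decide
    · obtain ⟨k, hkv⟩ : ∃ k : Nat, v = (k : Int) := ⟨v.toNat, by omega⟩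
      have hpos : 0 < k := by omega
      rw [hkv, Apipe_pos _ hpos, altGo_eq]
      simp
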